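-- pv_equiv track=rewrite | github.com/cizydorczyk/python_scripts | 2phd/LC3_parse_variant_coordinates.py | get_corrected_ref_positions
-- ===== SOURCE A (Python) =====
-- def get_corrected_ref_positions(ref_length, insertions_dict):
--     ref_positions = {}
--
--     for i in range(1,ref_length+1):
--         ref_positions[i] = i
--
--     for position in ref_positions:
--         adjusted_position = position
--         for insertion in sorted(insertions_dict):
--             if not position > insertion:
--                 break
--             else:
--                 adjusted_position += insertions_dict[insertion]
--         ref_positions[position] = adjusted_position
--
--     return(ref_positions)
-- ===== SOURCE B (Python) =====
-- def get_corrected_ref_positions(ref_length, insertions_dict):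
--     items = sorted(insertions_dict.items(), key=lambda kv: kv[0])
--     result = {}
--     offset = 0
--     j = 0
--     for pos in range(1, ref_length + 1):
--         while j < len(items) and items[j][0] < pos:
--             offset += items[j][1]
--             j += 1
--         result[pos] = pos + offset
--     return result
-- ===== Notes on version B (the rewrite author's own statement) =====
-- stated objective: faster
-- what changed: Instead of re-sorting the insertions and rescanning them for every reference position, B sorts the insertion items once and walks positions with a single advancing pointer that accumulates the running offset.
import Mathlib
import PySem

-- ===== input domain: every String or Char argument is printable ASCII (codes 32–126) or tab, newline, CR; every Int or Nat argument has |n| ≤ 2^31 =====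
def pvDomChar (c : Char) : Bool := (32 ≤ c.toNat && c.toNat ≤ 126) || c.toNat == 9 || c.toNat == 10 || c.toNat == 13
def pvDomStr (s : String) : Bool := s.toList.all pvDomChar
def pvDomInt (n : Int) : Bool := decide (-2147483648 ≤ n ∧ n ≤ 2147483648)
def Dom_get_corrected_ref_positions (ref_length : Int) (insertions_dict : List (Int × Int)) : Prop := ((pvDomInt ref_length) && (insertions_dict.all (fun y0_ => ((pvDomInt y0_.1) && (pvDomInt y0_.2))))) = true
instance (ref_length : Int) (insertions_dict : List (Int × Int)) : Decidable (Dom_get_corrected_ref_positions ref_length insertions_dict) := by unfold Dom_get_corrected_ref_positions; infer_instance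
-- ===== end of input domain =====

-- B sorts the insertion items ONCE and walks the positions with one advancing pointer
-- accumulating the running offset, instead of A's per-position re-sort and rescan (objective: faster).

-- ===== PORT A =====
-- inner 'for insertion in sorted(insertions_dict): if not position > insertion: break; else: adjusted += ...'
-- (the looked-up key always comes from the dict itself, so insertions_dict[insertion] never raises; getD's default is never used)
def pvAInner (ins : PySem.Dict Int Int) (position : Int) : List Int → Int → Int
  | [], acc => acc
  | k :: rest, acc =>
    if ¬ position > k then acc
    else pvAInner ins position rest (acc + ins.getD k 0)

def get_corrected_ref_positions (ref_length : Int) (insertions_dict : List (Int × Int)) : List (Int × Int) :=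
  let ins : PySem.Dict Int Int := PySem.Dict.ofList insertions_dict
  -- for i in range(1, ref_length+1): ref_positions[i] = i
  let ref0 : PySem.Dict Int Int :=
    (PySem.List.pyRange 1 (ref_length + 1) 1).foldl (fun d i => d.insert i i) PySem.Dict.empty
  -- for position in ref_positions: … ref_positions[position] = adjusted_position
  let final : PySem.Dict Int Int :=
    ref0.keys.foldl
      (fun d position =>
        d.insert position
          (pvAInner ins position (PySem.List.sorted ins.keys (fun k => k) false) position))
      ref0
  final.items

-- ===== PORT B =====
-- 'while j < len(items) and items[j][0] < pos: offset += items[j][1]; j += 1' — the pointer is the unconsumed suffix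
def pvBAdvance (pos : Int) : List (Int × Int) → Int → (List (Int × Int)) × Int
  | [], offset => ([], offset)
  | (k, v) :: rest, offset =>
    if k < pos then pvBAdvance pos rest (offset + v)
    else ((k, v) :: rest, offset)

-- 'for pos in range(1, ref_length+1): …; result[pos] = pos + offset' (fresh keys: the dict appends)
def pvBLoop : List Int → List (Int × Int) → Int → List (Int × Int) → List (Int × Int)
  | [], _, _, acc => acc
  | pos :: ps, items, offset, acc =>
    let st := pvBAdvance pos items offset
    pvBLoop ps st.1 st.2 (acc ++ [(pos, pos + st.2)])

def get_corrected_ref_positions_alt (ref_length : Int) (insertions_dict : List (Int × Int)) : List (Int × Int) :=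
  let items := PySem.List.sorted (PySem.Dict.ofList insertions_dict).items (fun kv => kv.1) false
  pvBLoop (PySem.List.pyRange 1 (ref_length + 1) 1) items 0 []

-- ===== PRECONDITION & SPEC =====
def Spec_get_corrected_ref_positions (ref_length : Int) (insertions_dict : List (Int × Int)) (out : List (Int × Int)) : Prop := out = get_corrected_ref_positions_alt ref_length insertions_dict
instance (ref_length : Int) (insertions_dict : List (Int × Int)) (out : List (Int × Int)) : Decidable (Spec_get_corrected_ref_positions ref_length insertions_dict out) := by unfold Spec_get_corrected_ref_positions; infer_instance

-- ===== CLAIM (what is proved, stated in full; the proofs are below) =====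
def Claim_equal_get_corrected_ref_positions : Prop := ∀ (ref_length : Int) (insertions_dict : List (Int × Int)), Dom_get_corrected_ref_positions ref_length insertions_dict → Spec_get_corrected_ref_positions ref_length insertions_dict (get_corrected_ref_positions ref_length insertions_dict)

-- ===== LEMMAS AND PROOFS =====

-- the offset both programs compute at position p, over the once-sorted item list
def pvOffset (sitems : List (Int × Int)) (p : Int) : Int :=
  ((sitems.takeWhile (fun kv => kv.1 < p)).map (·.2)).sum

-- B's while-loop takes exactly the takeWhile prefix
theorem pvBAdvance_eq (pos : Int) (l : List (Int × Int)) (offset : Int) :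
    pvBAdvance pos l offset =
      (l.dropWhile (fun kv => kv.1 < pos),
       offset + ((l.takeWhile (fun kv => kv.1 < pos)).map (·.2)).sum) := by
  induction l generalizing offset with
  | nil => simp [pvBAdvance]
  | cons kv rest ih =>
    obtain ⟨k, v⟩ := kv
    by_cases h : k < pos
    · simp [pvBAdvance, h, ih]
      ring
    · simp [pvBAdvance, h]

theorem pvBLoop_eq (ps : List Int) (done rem : List (Int × Int)) (acc : List (Int × Int))
    (hlt : ∀ q ∈ ps, ∀ kv ∈ done, kv.1 < q)
    (hps : ps.Pairwise (· ≤ ·)) :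
    pvBLoop ps rem ((done.map (·.2)).sum) acc =
      acc ++ ps.map (fun p => (p, p + pvOffset (done ++ rem) p)) := by
  induction ps generalizing done rem acc with
  | nil => simp [pvBLoop]
  | cons pos ps ih =>
    have hdone : ∀ kv ∈ done, kv.1 < pos := fun kv h => hlt pos (by simp) kv h
    have htw : (done ++ rem).takeWhile (fun kv => decide (kv.1 < pos)) =
        done ++ rem.takeWhile (fun kv => decide (kv.1 < pos)) :=
      List.takeWhile_append_of_pos (by intro kv h; simpa using hdone kv h)
    have step : pvBLoop (pos :: ps) rem ((done.map (·.2)).sum) acc =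
        pvBLoop ps (rem.dropWhile (fun kv => kv.1 < pos))
          (((done ++ rem.takeWhile (fun kv => kv.1 < pos)).map (·.2)).sum)
          (acc ++ [(pos, pos + pvOffset (done ++ rem) pos)]) := by
      simp only [pvBLoop, pvBAdvance_eq]
      congr 1
      · simp [List.map_append]
      · congr 2
        simp only [pvOffset, htw]
        simp [List.map_append]
    rw [step, ih (done ++ rem.takeWhile (fun kv => kv.1 < pos)) (rem.dropWhile (fun kv => kv.1 < pos))]
    · rw [List.append_assoc]
      congr 1
      have hrejoin : (done ++ rem.takeWhile (fun kv => kv.1 < pos)) ++ rem.dropWhile (fun kv => kv.1 < pos)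
          = done ++ rem := by
        rw [List.append_assoc, List.takeWhile_append_dropWhile]
      rw [hrejoin]
      simp [List.map_cons]
    · intro q hq kv hkv
      rcases List.mem_append.mp hkv with h | h
      · exact hlt q (by simp [hq]) kv h
      · have h1 : kv.1 < pos := by
          have := List.mem_takeWhile_imp h
          simpa using this
        have h2 : pos ≤ q := (List.pairwise_cons.mp hps).1 q hq
        omega
    · exact (List.pairwise_cons.mp hps).2

-- A's break-loop over the sorted keys is also a takeWhile prefix sum
theorem pvAInner_eq (ins : PySem.Dict Int Int) (pos : Int) (ks : List Int) (acc : Int) :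
    pvAInner ins pos ks acc =
      acc + ((ks.takeWhile (fun k => k < pos)).map (fun k => ins.getD k 0)).sum := by
  induction ks generalizing acc with
  | nil => simp [pvAInner]
  | cons k rest ih =>
    by_cases h : k < pos
    · simp [pvAInner, h, ih]
      ring
    · simp [pvAInner, h]

-- A's second fold: overwriting every present key i with g i rewrites the items pointwise
theorem pvUpdateFold_items (l : List Int) (g : Int → Int) (d : PySem.Dict Int Int)
    (hnd : l.Nodup) (hc : ∀ i ∈ l, d.contains i = true) :
    (l.foldl (fun d i => d.insert i (g i)) d).items =
      d.items.map (fun p => if p.1 ∈ l then (p.1, g p.1) else p) := by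
  induction l generalizing d with
  | nil => simp
  | cons i rest ih =>
    have hci : d.contains i = true := hc i (by simp)
    have hrest : ∀ j ∈ rest, (d.insert i (g i)).contains j = true := by
      intro j hj
      rw [PySem.Dict.contains_insert]
      simp [hc j (by simp [hj])]
    rw [List.foldl_cons, ih (d.insert i (g i)) hnd.of_cons hrest,
        PySem.Dict.items_insert_of_contains _ _ hci, List.map_map]
    apply List.map_congr_left
    intro p _
    by_cases hpi : p.1 = i
    · have : i ∉ rest := (List.nodup_cons.mp hnd).1
      simp [Function.comp, hpi, this]
    · simp [Function.comp, hpi]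

-- ===== assembling both sides =====

theorem bSide (ref_length : Int) (insertions_dict : List (Int × Int)) :
    get_corrected_ref_positions_alt ref_length insertions_dict =
      (PySem.List.pyRange 1 (ref_length + 1) 1).map
        (fun p => (p, p + pvOffset (PySem.List.sorted (PySem.Dict.ofList insertions_dict).items (fun kv => kv.1) false) p)) := by
  unfold get_corrected_ref_positions_alt
  have h := pvBLoop_eq (PySem.List.pyRange 1 (ref_length + 1) 1) []
      (PySem.List.sorted (PySem.Dict.ofList insertions_dict).items (fun kv => kv.1) false) []
      (by simp)
      ((PySem.List.pairwise_lt_pyRange_one 1 (ref_length + 1)).imp (fun h => le_of_lt h))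
  simpa using h

-- sorted keys = first components of the sorted items (keys are distinct)
theorem sortedKeys_eq (d : PySem.Dict Int Int) (hnd : d.keys.Nodup) :
    PySem.List.sorted d.keys (fun k => k) false =
      (PySem.List.sorted d.items (fun kv => kv.1) false).map (·.1) := by
  apply PySem.List.sorted_eq_of_perm_of_pairwise_lt
  · have hperm : (PySem.List.sorted d.items (fun kv => kv.1) false).Perm d.items :=
      PySem.List.sorted_perm _ _ _
    have := hperm.map (·.1)
    simpa [PySem.Dict.keys] using this
  · have hle : ((PySem.List.sorted d.items (fun kv => kv.1) false).map (·.1)).Pairwise (· ≤ ·) :=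
      PySem.List.sorted_map_key_pairwise _ _
    have hnd' : ((PySem.List.sorted d.items (fun kv => kv.1) false).map (·.1)).Nodup := by
      have hperm : (PySem.List.sorted d.items (fun kv => kv.1) false).Perm d.items :=
        PySem.List.sorted_perm _ _ _
      exact ((hperm.map (·.1)).nodup_iff).mpr (by simpa [PySem.Dict.keys] using hnd)
    have := hle.and (hnd'.imp (fun h => h))
    exact this.imp (fun ⟨h1, h2⟩ => lt_of_le_of_ne h1 h2)

-- A's per-position offset over the sorted keys equals pvOffset over the sorted items
theorem offset_bridge (d : PySem.Dict Int Int) (hnd : d.keys.Nodup) (p : Int) :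
    (((PySem.List.sorted d.keys (fun k => k) false).takeWhile (fun k => k < p)).map
        (fun k => d.getD k 0)).sum =
      pvOffset (PySem.List.sorted d.items (fun kv => kv.1) false) p := by
  rw [sortedKeys_eq d hnd, pvOffset, List.takeWhile_map, List.map_map]
  apply congrArg List.sum
  apply List.map_congr_left
  intro kv hkv
  have hmem : kv ∈ d.items := by
    have h1 : kv ∈ PySem.List.sorted d.items (fun kv => kv.1) false :=
      (List.takeWhile_sublist _).subset hkv
    exact (PySem.List.mem_sorted _ _ _ _).mp h1
  simp [PySem.Dict.getD_of_mem_items d hmem hnd 0]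

theorem aSide (ref_length : Int) (insertions_dict : List (Int × Int)) :
    get_corrected_ref_positions ref_length insertions_dict =
      (PySem.List.pyRange 1 (ref_length + 1) 1).map
        (fun p => (p, p + pvOffset (PySem.List.sorted (PySem.Dict.ofList insertions_dict).items (fun kv => kv.1) false) p)) := by
  have hnd : (PySem.Dict.ofList insertions_dict : PySem.Dict Int Int).keys.Nodup :=
    PySem.Dict.nodup_keys_ofList insertions_dict
  set d : PySem.Dict Int Int := PySem.Dict.ofList insertions_dict with hd
  set R : List Int := PySem.List.pyRange 1 (ref_length + 1) 1 with hR
  set ref0 : PySem.Dict Int Int := R.foldl (fun d i => d.insert i i) PySem.Dict.empty with href0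
  set g : Int → Int := fun position =>
    pvAInner d position (PySem.List.sorted d.keys (fun k => k) false) position with hg
  have hRnd : R.Nodup := by rw [hR]; exact PySem.List.nodup_pyRange_one 1 (ref_length + 1)
  have hfresh : ref0.items = R.map (fun i => (i, i)) := by
    rw [href0]
    have := PySem.Dict.items_foldl_insert_fresh (l := R) (k := fun i => i) (v := fun i => i)
      (d := PySem.Dict.empty) (by intro a _; simp) (by simpa using hRnd)
    simpa using this
  have hkeys0 : ref0.keys = R := by
    simp only [PySem.Dict.keys, hfresh, List.map_map]
    rw [show ((fun x : ℤ × ℤ => x.1) ∘ fun i : ℤ => (i, i)) = id from rfl, List.map_id]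
  have hcont : ∀ i ∈ R, ref0.contains i = true := by
    intro i hi
    rw [PySem.Dict.contains_iff_mem_keys, hkeys0]
    exact hi
  have hstart : get_corrected_ref_positions ref_length insertions_dict =
      (ref0.keys.foldl (fun dd i => dd.insert i (g i)) ref0).items := rfl
  rw [hstart, hkeys0, pvUpdateFold_items R g ref0 hRnd hcont, hfresh, List.map_map]
  apply List.map_congr_left
  intro i hi
  simp only [Function.comp, hi, if_pos, hg, pvAInner_eq, offset_bridge d hnd i]

-- ===== VERDICT (by name: the statement is the Claim_ definition above) =====
theorem get_corrected_ref_positions_spec : Claim_equal_get_corrected_ref_positions := by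
  intro ref_length insertions_dict _
  unfold Spec_get_corrected_ref_positions
  rw [aSide, bSide]
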